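-- pv_equiv track=rewrite | github.com/Zayac11/python-4-sem | 2/main.py | f22
-- ===== SOURCE A (Python) =====
-- def get_bit(n, i):
--     return n & (1 << i) == (1 << i)
--
-- def f22(n):
--     b = 0
--     # a
--     for i in range(2):
--         b = b | get_bit(n, (i + 0)) << (i + 18)
--     # b
--     for i in range(12):
--         b = b | get_bit(n, (i + 2)) << (i + 20)
--     # c
--     for i in range(6):
--         b = b | get_bit(n, (i + 14)) << (i + 1)
--     # d
--     for i in range(2):
--         b = b | get_bit(n, (i + 20)) << (i + 16)
--     # e
--     for i in range(5):
--         b = b | get_bit(n, (i + 22)) << (i + 10)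
--     # f
--     for i in range(2):
--         b = b | get_bit(n, (i + 26)) << (i + 14)
--     # g
--     for i in range(3):
--         b = b | get_bit(n, (i + 28)) << (i + 7)
--     # h
--     for i in range(1):
--         b = b | get_bit(n, (i + 31)) << (i + 0)
--
--     return int(b)
-- ===== SOURCE B (Python) =====
-- # Source bit index feeding each destination bit, listed from bit 0 upward.
-- _SRC = [31, 14, 15, 16, 17, 18, 19, 28, 29, 30, 22, 23, 24, 25, 26, 27,
--         20, 21, 0, 1, 2, 3, 4, 5, 6, 7, 8, 9, 10, 11, 12, 13]
--
--
-- def f22(n):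
--     b = 0
--     for s in reversed(_SRC):
--         b = 2 * b + ((n >> s) & 1)
--     return b
-- ===== Notes on version B (the rewrite author's own statement) =====
-- stated objective: alternative
-- what changed: Instead of OR-ing each source bit into its destination over eight unrolled forward loops, B inverts the permutation once into a single list giving the source bit of each destination bit and builds the result arithmetically, most significant bit first, by Horner accumulation (double, then add the next bit).
import Mathlib
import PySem

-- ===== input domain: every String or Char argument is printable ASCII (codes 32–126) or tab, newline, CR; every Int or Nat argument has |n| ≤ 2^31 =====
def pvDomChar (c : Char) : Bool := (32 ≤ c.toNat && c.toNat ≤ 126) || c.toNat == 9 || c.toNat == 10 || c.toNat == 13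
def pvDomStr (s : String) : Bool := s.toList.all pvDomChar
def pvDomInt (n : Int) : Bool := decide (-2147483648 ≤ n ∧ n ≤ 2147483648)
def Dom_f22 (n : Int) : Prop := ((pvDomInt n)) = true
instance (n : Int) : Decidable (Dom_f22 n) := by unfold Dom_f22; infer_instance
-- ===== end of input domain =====

-- B inverts the bit permutation into one 32-entry source-index table (source bit feeding each
-- destination bit) and builds the result arithmetically MSB-first by Horner accumulation
-- (double, then add the next bit), instead of A's eight forward loops OR-ing shifted bits into place (objective: alternative).


-- ===== PORT A =====
-- get_bit(n, i) = n & (1 << i) == (1 << i)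
def pvGetBit (n : Int) (i : Nat) : Bool := PySem.Int.band n (1 <<< i) == 1 <<< i

-- each 'for i in range(k): b = b | get_bit(n, i+src) << (i+dst)' becomes a foldl over List.range k
def f22 (n : Int) : Int :=
  let b : Int := 0
  -- a
  let b := (List.range 2).foldl (fun b i => PySem.Int.bor b ((if pvGetBit n (i + 0) then (1:Int) else 0) <<< (i + 18))) b
  -- b
  let b := (List.range 12).foldl (fun b i => PySem.Int.bor b ((if pvGetBit n (i + 2) then (1:Int) else 0) <<< (i + 20))) b
  -- c
  let b := (List.range 6).foldl (fun b i => PySem.Int.bor b ((if pvGetBit n (i + 14) then (1:Int) else 0) <<< (i + 1))) b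
  -- d
  let b := (List.range 2).foldl (fun b i => PySem.Int.bor b ((if pvGetBit n (i + 20) then (1:Int) else 0) <<< (i + 16))) b
  -- e
  let b := (List.range 5).foldl (fun b i => PySem.Int.bor b ((if pvGetBit n (i + 22) then (1:Int) else 0) <<< (i + 10))) b
  -- f
  let b := (List.range 2).foldl (fun b i => PySem.Int.bor b ((if pvGetBit n (i + 26) then (1:Int) else 0) <<< (i + 14))) b
  -- g
  let b := (List.range 3).foldl (fun b i => PySem.Int.bor b ((if pvGetBit n (i + 28) then (1:Int) else 0) <<< (i + 7))) b
  -- h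
  let b := (List.range 1).foldl (fun b i => PySem.Int.bor b ((if pvGetBit n (i + 31) then (1:Int) else 0) <<< (i + 0))) b
  b

-- ===== PORT B =====
-- _SRC: source bit index feeding each destination bit, from destination bit 0 upward
def pvSrc : List Nat :=
  [31, 14, 15, 16, 17, 18, 19, 28, 29, 30, 22, 23, 24, 25, 26, 27,
   20, 21, 0, 1, 2, 3, 4, 5, 6, 7, 8, 9, 10, 11, 12, 13]

-- b = 0; for s in reversed(_SRC): b = 2*b + ((n >> s) & 1); return b
def f22_alt (n : Int) : Int :=
  pvSrc.reverse.foldl (fun b (s : Nat) => 2 * b + PySem.Int.band (n >>> s) 1) 0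

-- ===== PRECONDITION & SPEC =====
def Spec_f22 (n : Int) (out : Int) : Prop := out = f22_alt n
instance (n : Int) (out : Int) : Decidable (Spec_f22 n out) := by unfold Spec_f22; infer_instance

-- ===== CLAIM (what is proved, stated in full; the proofs are below) =====
def Claim_equal_f22 : Prop := ∀ (n : Int), Dom_f22 n → Spec_f22 n (f22 n)

-- ===== LEMMAS AND PROOFS =====
-- pvTb n i: bit i of n in Python's infinite two's complement
def pvTb (n : Int) (i : Nat) : Bool :=
  match n with
  | .ofNat m => m.testBit i
  | .negSucc m => !m.testBit i

lemma pv_band_tb (n : Int) (i : Nat) :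
    PySem.Int.band (n >>> i) 1 = (((pvTb n i).toNat : Nat) : Int) := by
  cases n with
  | ofNat m =>
    have hs : (Int.ofNat m) >>> i = Int.ofNat (m >>> i) := rfl
    rw [hs]
    have hb2 : PySem.Int.band (Int.ofNat (m >>> i)) 1 = (((m >>> i) &&& 1 : Nat) : Int) := by
      simpa using PySem.Int.band_natCast (m >>> i) 1
    rw [hb2]
    have h : (m >>> i) &&& 1 = (m.testBit i).toNat := by
      simp [Nat.testBit, Nat.and_one_is_mod]
      rcases Nat.mod_two_eq_zero_or_one (m >>> i) with h | h <;> simp [h]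
    rw [h, pvTb]
  | negSucc m =>
    have hs : (Int.negSucc m) >>> i = Int.negSucc (m >>> i) := rfl
    rw [hs]
    have hneg2 : ¬ (0 : Int) ≤ Int.negSucc (m >>> i) := by
      generalize m >>> i = k; simp only [Int.negSucc_eq]; omega
    have h10 : (0 : Int) ≤ 1 := by norm_num
    have hm2 : (-(Int.negSucc (m >>> i)) - 1).toNat = m >>> i := by
      generalize m >>> i = k; simp only [Int.negSucc_eq]; omega
    have hR : PySem.Int.band (Int.negSucc (m >>> i)) 1
        = ((1 - (1 &&& (m >>> i)) : Nat) : Int) := by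
      unfold PySem.Int.band
      rw [if_neg hneg2, if_pos h10, Int.toNat_one, hm2]
    rw [hR]
    have h : 1 - (1 &&& (m >>> i)) = (!m.testBit i).toNat := by
      rw [Nat.and_comm, Nat.and_one_is_mod]
      simp [Nat.testBit]
      rcases Nat.mod_two_eq_zero_or_one (m >>> i) with h | h <;> simp [h]
    rw [h, pvTb]

lemma pv_nat_bit (m i : Nat) :
    ((m >>> i) &&& 1) = if m &&& (1 <<< i) = 1 <<< i then 1 else 0 := by
  rw [Nat.and_one_is_mod, Nat.shiftRight_eq_div_pow, Nat.one_shiftLeft, Nat.and_two_pow]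
  have ht := Nat.testBit_eq_decide_div_mod_eq (x := m) (i := i)
  by_cases h : m.testBit i = true
  · have h1 : m / 2 ^ i % 2 = 1 := by
      rw [h] at ht; exact of_decide_eq_true ht.symm
    have hcond : (Nat.testBit m i).toNat * 2 ^ i = 2 ^ i := by rw [h]; simp
    rw [if_pos hcond]; exact h1
  · have hf : m.testBit i = false := by simpa using h
    have h1 : m / 2 ^ i % 2 = 0 := by
      have hd : decide (m / 2 ^ i % 2 = 1) = false := by rw [← ht, hf]
      have := of_decide_eq_false hd
      omega
    have hcond : (Nat.testBit m i).toNat * 2 ^ i ≠ 2 ^ i := by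
      rw [hf]; have := Nat.two_pow_pos i; simp; omega
    rw [if_neg hcond]; exact h1

lemma pv_bit_eq (n : Int) (i : Nat) :
    (if pvGetBit n i then (1:Int) else 0) = PySem.Int.band (n >>> i) 1 := by
  unfold pvGetBit
  cases n with
  | ofNat m =>
    have hs : (Int.ofNat m) >>> i = Int.ofNat (m >>> i) := rfl
    rw [hs]
    have hb2 : PySem.Int.band (Int.ofNat (m >>> i)) 1 = (((m >>> i) &&& 1 : Nat) : Int) := by
      simpa using PySem.Int.band_natCast (m >>> i) 1
    rw [hb2, pv_nat_bit m i]
    simp only [Int.ofNat_eq_natCast, PySem.Int.band_natCast, beq_iff_eq, Nat.cast_inj]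
    by_cases h : m &&& (1 <<< i) = 1 <<< i <;> simp [h]
  | negSucc m =>
    have hs : (Int.negSucc m) >>> i = Int.negSucc (m >>> i) := rfl
    rw [hs]
    have hneg : ¬ (0 : Int) ≤ Int.negSucc m := by simp only [Int.negSucc_eq]; omega
    have hneg2 : ¬ (0 : Int) ≤ Int.negSucc (m >>> i) := by
      generalize m >>> i = k; simp only [Int.negSucc_eq]; omega
    have hm : (-(Int.negSucc m) - 1).toNat = m := by simp only [Int.negSucc_eq]; omega
    have hm2 : (-(Int.negSucc (m >>> i)) - 1).toNat = m >>> i := by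
      generalize m >>> i = k; simp only [Int.negSucc_eq]; omega
    have hb0 : (0 : Int) ≤ ((1 <<< i : Nat) : Int) := by positivity
    have h10 : (0 : Int) ≤ 1 := by norm_num
    have hL : PySem.Int.band (Int.negSucc m) ((1 <<< i : Nat) : Int)
        = (((1 <<< i) - ((1 <<< i) &&& m) : Nat) : Int) := by
      unfold PySem.Int.band
      rw [if_neg hneg, if_pos hb0, Int.toNat_natCast, hm]
    have hR : PySem.Int.band (Int.negSucc (m >>> i)) 1
        = ((1 - (1 &&& (m >>> i)) : Nat) : Int) := by
      unfold PySem.Int.band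
      rw [if_neg hneg2, if_pos h10, Int.toNat_one, hm2]
    rw [hL, hR]
    have h1 : (1 &&& (m >>> i)) = ((m >>> i) &&& 1) := Nat.and_comm _ _
    have hand : (1 <<< i) &&& m = m &&& (1 <<< i) := Nat.and_comm _ _
    rw [h1, pv_nat_bit m i, hand]
    have hp0 : 0 < 1 <<< i := by rw [Nat.one_shiftLeft]; exact Nat.two_pow_pos i
    have hi : ((1 <<< i : Nat) : Int) ≠ 0 := by exact_mod_cast hp0.ne'
    by_cases h : m &&& (1 <<< i) = 1 <<< i
    · rw [h, Nat.sub_self]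
      have hne2 : ((0:Nat) : Int) ≠ ((1 <<< i : Nat) : Int) := by exact_mod_cast hp0.ne
      rw [if_pos rfl, if_neg (by simpa using hne2)]
      simp
    · have hz : m &&& (1 <<< i) = 0 := by
        rcases Bool.eq_false_or_eq_true (m.testBit i) with htb | hf
        · exact absurd (by rw [Nat.one_shiftLeft, Nat.and_two_pow, htb]; simp) h
        · rw [Nat.one_shiftLeft, Nat.and_two_pow, hf]; simp
      rw [hz, Nat.sub_zero]
      simp [hp0.ne]

lemma pv_bit_tb (n : Int) (i : Nat) :
    (if pvGetBit n i then (1:Int) else 0) = (((pvTb n i).toNat : Nat) : Int) := by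
  rw [pv_bit_eq, pv_band_tb]

lemma pv_decide_toNat (b : Bool) : decide (b.toNat % 2 = 1) = b := by cases b <;> simp

lemma pv_toNat_testBit (b : Bool) (j : Nat) : (b.toNat).testBit j = (b && decide (j = 0)) := by
  cases b <;> cases j <;> simp [Nat.testBit_succ]

lemma pv_shift_hi (b : Bool) (d i : Nat) (hd : d < 32) (hi : 32 ≤ i) :
    ((b.toNat) <<< d).testBit i = false := by
  apply Nat.testBit_eq_false_of_lt
  have h1 : b.toNat <<< d = b.toNat * 2 ^ d := Nat.shiftLeft_eq ..
  have h2 : b.toNat ≤ 1 := Bool.toNat_le b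
  have h3 : (2:Nat) ^ d < 2 ^ i := Nat.pow_lt_pow_right (by norm_num) (by omega)
  have h4 : b.toNat * 2 ^ d ≤ 2 ^ d := by
    calc b.toNat * 2 ^ d ≤ 1 * 2 ^ d := Nat.mul_le_mul_right _ h2
    _ = 2 ^ d := one_mul _
  omega

lemma pv_fold_cast (l : List Bool) (a : Nat) :
    l.foldl (fun (b : Int) x => 2 * b + ((x.toNat : Nat) : Int)) (a : Int)
      = ((l.foldl (fun b x => 2 * b + x.toNat) a : Nat) : Int) := by
  induction l generalizing a with
  | nil => rfl
  | cons x l ih =>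
    simp only [List.foldl_cons]
    rw [show (2 * (a:Int) + ((x.toNat : Nat) : Int)) = ((2 * a + x.toNat : Nat) : Int) by push_cast; ring]
    exact ih _

lemma pv_horner_testBit (l : List Bool) (a : Nat) (i : Nat) :
    (l.foldl (fun b x => 2 * b + x.toNat) a).testBit i =
      if h : i < l.length then l[l.length - 1 - i] else a.testBit (i - l.length) := by
  induction l generalizing a i with
  | nil => simp
  | cons x l ih =>
    simp only [List.foldl_cons, List.length_cons]
    rw [ih]
    rcases Nat.lt_trichotomy i l.length with hlt | heq | hgt
    · rw [dif_pos hlt, dif_pos (by omega), List.getElem_cons]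
      rw [dif_neg (by omega)]
      congr 1
      omega
    · rw [dif_neg (by omega), dif_pos (by omega), List.getElem_cons, dif_pos (by omega)]
      have h1 : i - l.length = 0 := by omega
      rw [h1]
      rcases x with _ | _ <;> simp [Nat.testBit]
    · rw [dif_neg (by omega), dif_neg (by omega)]
      have h1 : i - l.length = (i - (l.length + 1)) + 1 := by omega
      rw [h1, Nat.testBit_add_one]
      congr 1
      rcases x with _ | _ <;> (simp; try omega)

-- ===== VERDICT (by name: the statement is the Claim_ definition above) =====
theorem f22_spec : Claim_equal_f22 := by
  intro n _
  show f22 n = f22_alt n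
  have hB : f22_alt n = ((( ([pvTb n 13, pvTb n 12, pvTb n 11, pvTb n 10, pvTb n 9, pvTb n 8, pvTb n 7, pvTb n 6, pvTb n 5, pvTb n 4, pvTb n 3, pvTb n 2, pvTb n 1, pvTb n 0, pvTb n 21, pvTb n 20, pvTb n 27, pvTb n 26, pvTb n 25, pvTb n 24, pvTb n 23, pvTb n 22, pvTb n 30, pvTb n 29, pvTb n 28, pvTb n 19, pvTb n 18, pvTb n 17, pvTb n 16, pvTb n 15, pvTb n 14, pvTb n 31] : List Bool) ).foldl (fun b x => 2 * b + x.toNat) 0 : Nat) : Int) := by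
    unfold f22_alt
    simp only [pv_band_tb]
    rw [← List.foldl_map (f := pvTb n) (g := fun (b : Int) x => 2 * b + ((x.toNat : Nat) : Int))]
    rw [show (0 : Int) = ((0 : Nat) : Int) from rfl, pv_fold_cast]
    rw [show pvSrc.reverse.map (pvTb n) = ([pvTb n 13, pvTb n 12, pvTb n 11, pvTb n 10, pvTb n 9, pvTb n 8, pvTb n 7, pvTb n 6, pvTb n 5, pvTb n 4, pvTb n 3, pvTb n 2, pvTb n 1, pvTb n 0, pvTb n 21, pvTb n 20, pvTb n 27, pvTb n 26, pvTb n 25, pvTb n 24, pvTb n 23, pvTb n 22, pvTb n 30, pvTb n 29, pvTb n 28, pvTb n 19, pvTb n 18, pvTb n 17, pvTb n 16, pvTb n 15, pvTb n 14, pvTb n 31] : List Bool) from rfl]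
  have r2 : List.range 2 = [0, 1] := rfl
  have r12 : List.range 12 = [0,1,2,3,4,5,6,7,8,9,10,11] := rfl
  have r6 : List.range 6 = [0,1,2,3,4,5] := rfl
  have r5 : List.range 5 = [0,1,2,3,4] := rfl
  have r3 : List.range 3 = [0,1,2] := rfl
  have r1 : List.range 1 = [0] := rfl
  simp only [f22, r2, r12, r6, r5, r3, r1, List.foldl_cons, List.foldl_nil, pv_bit_tb,
    Nat.reduceAdd]
  rw [show (0 : Int) = ((0 : Nat) : Int) from rfl]
  simp only [show ∀ (t d : Nat), ((t : Int) <<< d) = ((t <<< d : Nat) : Int) from fun t d => by simp,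
    PySem.Int.bor_natCast]
  rw [hB, Nat.cast_inj]
  apply Nat.eq_of_testBit_eq
  intro i
  rw [pv_horner_testBit]
  simp only [List.length_cons, List.length_nil, Nat.reduceAdd]
  by_cases hi : i < 32
  · rw [dif_pos hi]
    interval_cases i <;>
      simp [Nat.testBit_shiftLeft, pv_toNat_testBit, pv_decide_toNat]
  · rw [dif_neg hi]
    have h32 : 32 ≤ i := Nat.le_of_not_lt hi
    have hfalse : ∀ (b : Bool) (d : Nat), d < 32 → ((b.toNat) <<< d).testBit i = false :=
      fun b d hd => pv_shift_hi b d i hd h32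
    simp only [Nat.testBit_lor, hfalse, Nat.reduceLT, Nat.zero_testBit, Bool.or_self]
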